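-- pv_equiv track=rewrite | github.com/ramaniji/relations_python | partial_order.py | findLowerBounds
-- ===== SOURCE A (Python) =====
-- def findLowerBounds(A,   R,   P):
--
--     C = []
--     for k in range(len(A)):
--         s = 0
--         temp = A[k]
--         for i in range(len(P)):
--             if( [temp,   P[i]] in R):
--                 s = s + 1
--         if(s == len(P)):
--             C.append(temp)
--     return(C)
-- ===== SOURCE B (Python) =====
-- def findLowerBounds(A, R, P):
--     adj = {}
--     for pair in R:
--         if len(pair) == 2:
--             adj.setdefault(pair[0], set()).add(pair[1])
--     Pset = set(P)
--     empty = set()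
--     return [a for a in A if Pset <= adj.get(a, empty)]
-- ===== Notes on version B (the rewrite author's own statement) =====
-- stated objective: faster
-- what changed: Builds a dict from each first element to the set of its successors in one pass over R, then keeps each a in A whose successor set contains all of P (a single subset test), instead of re-scanning R for every (a, P[i]) pair.
import Mathlib
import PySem

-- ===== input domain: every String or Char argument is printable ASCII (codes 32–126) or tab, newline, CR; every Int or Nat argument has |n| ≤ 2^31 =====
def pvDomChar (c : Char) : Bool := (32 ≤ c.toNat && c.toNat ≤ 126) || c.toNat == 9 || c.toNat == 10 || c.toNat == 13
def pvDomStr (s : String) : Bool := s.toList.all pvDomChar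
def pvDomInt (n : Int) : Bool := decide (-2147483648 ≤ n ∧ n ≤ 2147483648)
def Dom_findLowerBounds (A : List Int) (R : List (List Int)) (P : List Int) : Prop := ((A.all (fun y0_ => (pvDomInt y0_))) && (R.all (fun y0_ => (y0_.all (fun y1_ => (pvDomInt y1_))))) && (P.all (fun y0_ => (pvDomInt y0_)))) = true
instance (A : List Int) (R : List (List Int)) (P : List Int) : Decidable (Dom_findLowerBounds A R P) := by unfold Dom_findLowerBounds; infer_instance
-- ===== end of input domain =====

-- B builds the successor-set index over R once and filters A by a subset test,
-- instead of re-scanning R for every (a, P[i]) pair (objective: faster).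

-- ===== PORT A =====
def findLowerBounds (A : List Int) (R : List (List Int)) (P : List Int) : List Int :=
  A.foldl (fun C temp =>
    let s : Int := P.foldl (fun s p => if [temp, p] ∈ R then s + 1 else s) 0
    if s = (P.length : Int) then C ++ [temp] else C) []

-- ===== PORT B =====
-- adj.setdefault(pair[0], set()).add(pair[1])  =  modify pair[0] ∅ (·.add pair[1])
def pvBuildAdj (R : List (List Int)) : PySem.Dict Int (PySem.Set Int) :=
  R.foldl (fun adj pair =>
    match pair with
    | [a, b] => adj.modify a PySem.Set.empty (fun s => PySem.Set.add s b)
    | _ => adj) PySem.Dict.empty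

def findLowerBounds_alt (A : List Int) (R : List (List Int)) (P : List Int) : List Int :=
  let adj := pvBuildAdj R
  let Pset := PySem.Set.ofList P
  A.filter (fun a => PySem.Set.issubset Pset (adj.getD a PySem.Set.empty))

-- ===== PRECONDITION & SPEC =====
def Spec_findLowerBounds (A : List Int) (R : List (List Int)) (P : List Int) (out : List Int) : Prop := out = findLowerBounds_alt A R P
instance (A : List Int) (R : List (List Int)) (P : List Int) (out : List Int) : Decidable (Spec_findLowerBounds A R P out) := by unfold Spec_findLowerBounds; infer_instance

-- ===== CLAIM (what is proved, stated in full; the proofs are below) =====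
def Claim_equal_findLowerBounds : Prop := ∀ (A : List Int) (R : List (List Int)) (P : List Int), Dom_findLowerBounds A R P → Spec_findLowerBounds A R P (findLowerBounds A R P)

-- ===== LEMMAS AND PROOFS =====

-- the index characterisation: b is in a's successor set iff [a,b] ∈ R
theorem pvMem_buildAdj_fold (R : List (List Int)) (adj : PySem.Dict Int (PySem.Set Int))
    (a b : Int) :
    (b ∈ (R.foldl (fun adj pair =>
      match pair with
      | [x, y] => adj.modify x PySem.Set.empty (fun s => PySem.Set.add s y)
      | _ => adj) adj).getD a PySem.Set.empty) ↔ [a, b] ∈ R ∨ b ∈ adj.getD a PySem.Set.empty := by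
  induction R generalizing adj with
  | nil => simp
  | cons pair rest ih =>
    match pair with
    | [x, y] =>
      simp only [List.foldl_cons, ih, List.mem_cons, PySem.Dict.getD_modify]
      by_cases hax : a = x
      · subst hax
        simp [PySem.Set.mem_add]
        tauto
      · have : ¬ ([a, b] = [x, y]) := by simp; intro h; exact absurd h hax
        simp [hax, this]
    | [] =>
      simp only [List.foldl_cons, ih, List.mem_cons]
      simp
    | [x] =>
      simp only [List.foldl_cons, ih, List.mem_cons]
      simp
    | x :: y :: z :: t =>
      simp only [List.foldl_cons, ih, List.mem_cons]
      simp

theorem pvMem_buildAdj (R : List (List Int)) (a b : Int) :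
    (b ∈ (pvBuildAdj R).getD a PySem.Set.empty) ↔ [a, b] ∈ R := by
  have := pvMem_buildAdj_fold R PySem.Dict.empty a b
  simpa [pvBuildAdj] using this

-- A's inner counting loop reaches len(P) iff every p ∈ P is related
theorem pvCount_eq_len (R : List (List Int)) (t : Int) (P : List Int) :
    (P.foldl (fun s p => if [t, p] ∈ R then s + 1 else s) (0 : Int)) = (P.length : Int)
      ↔ ∀ p ∈ P, [t, p] ∈ R := by
  have hfun : (fun (s : Int) p => if [t, p] ∈ R then s + 1 else s)
      = (fun (s : Int) p => if (fun q => decide ([t, q] ∈ R)) p = true then s + 1 else s) := by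
    funext s p; simp
  rw [hfun, PySem.List.foldl_count_if]
  rw [zero_add]
  constructor
  · intro h p hp
    have hc : P.countP (fun p => decide ([t, p] ∈ R)) = P.length := by exact_mod_cast h
    have := (List.countP_eq_length).1 hc p hp
    simpa using this
  · intro h
    have hc : P.countP (fun p => decide ([t, p] ∈ R)) = P.length :=
      (List.countP_eq_length).2 (fun p hp => by simpa using h p hp)
    exact_mod_cast hc

-- ===== VERDICT (by name: the statement is the Claim_ definition above) =====
theorem findLowerBounds_spec : Claim_equal_findLowerBounds := by
  intro A R P _
  unfold Spec_findLowerBounds findLowerBounds findLowerBounds_alt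
  have hfun : (fun (C : List Int) temp =>
        let s : Int := P.foldl (fun s p => if [temp, p] ∈ R then s + 1 else s) 0
        if s = (P.length : Int) then C ++ [temp] else C)
      = (fun (C : List Int) temp =>
        if (fun t => decide (P.foldl (fun s p => if [t, p] ∈ R then s + 1 else s) 0 = (P.length : Int))) temp = true
        then C ++ [id temp] else C) := by
    funext C temp; simp
  rw [hfun, PySem.List.foldl_append_if]
  simp only [List.nil_append, List.map_id]
  apply List.filter_congr
  intro a _
  rw [Bool.eq_iff_iff]
  simp only [decide_eq_true_eq, PySem.Set.issubset_iff, PySem.Set.mem_ofList, pvMem_buildAdj]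
  exact pvCount_eq_len R a P
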